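-- pv_equiv track=rewrite | github.com/mrkickling/pythonkurs | tillfalle5/solutions/uppg1.py | rovarsprak
-- ===== SOURCE A (Python) =====
-- def rovarsprak(text):
--     text = text.lower() # Gör allt till lowercase för enklare program
--     konsonanter = "bcdfghjklmnpqrstvwxz"
--     result = "" # vår resultat-sträng
--     for letter in text: # gå igenom alla bokstäver i indata-strängen (i ordning)
--         if letter in konsonanter: # Om bokstaven är en konsonant, lägg in bokstav + o + bokstav
--             result += letter + "o" + letter
--         else: # Annars lägg till som vanligt i resultatsträngen
--             result += letter
--
--     return result
-- ===== SOURCE B (Python) =====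
-- def rovarsprak(text):
--     t = text.lower()
--     konsonanter = "bcdfghjklmnpqrstvwxz"
--
--     def enc(s):
--         if len(s) == 0:
--             return ""
--         if len(s) == 1:
--             return s + "o" + s if s in konsonanter else s
--         m = len(s) // 2
--         return enc(s[:m]) + enc(s[m:])
--
--     return enc(t)
-- ===== Notes on version B (the rewrite author's own statement) =====
-- stated objective: alternative
-- what changed: Replaced the left-to-right accumulator loop by a divide-and-conquer recursion that splits the lowercased string in half, encodes each half independently, and concatenates; single characters are encoded at the leaves (correct because the encoding is character-wise, hence a monoid homomorphism over concatenation).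
import Mathlib
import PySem

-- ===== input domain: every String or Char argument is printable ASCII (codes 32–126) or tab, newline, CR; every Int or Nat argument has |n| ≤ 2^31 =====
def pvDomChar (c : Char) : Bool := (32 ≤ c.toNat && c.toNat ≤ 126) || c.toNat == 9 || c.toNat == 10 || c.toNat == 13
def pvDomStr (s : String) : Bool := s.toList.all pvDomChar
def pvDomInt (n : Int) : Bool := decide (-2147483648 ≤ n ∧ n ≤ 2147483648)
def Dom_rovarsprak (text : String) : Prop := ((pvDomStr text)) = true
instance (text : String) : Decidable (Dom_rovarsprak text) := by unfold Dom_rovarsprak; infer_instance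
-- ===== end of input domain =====

-- B replaces A's left-to-right accumulator loop by a divide-and-conquer recursion
-- (split in half, encode each half, concatenate); correct because the encoding is
-- character-wise. Objective: alternative (not faster).

-- ===== PORT A =====
def rovarsprak (text : String) : String :=
  let text := PySem.Str.lower text
  let konsonanter := "bcdfghjklmnpqrstvwxz"
  let result : List Char :=
    text.toList.foldl (fun acc letter =>
      if konsonanter.toList.contains letter then
        acc ++ [letter, 'o', letter]
      else
        acc ++ [letter]) []
  String.ofList result

-- ===== PORT B =====
-- enc(s): empty -> "", single char -> doubled-with-o if consonant, else itself;
-- otherwise split at len//2, recurse on both halves, concatenate.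
def rovEnc : List Char → List Char
  | [] => []
  | [c] => if "bcdfghjklmnpqrstvwxz".toList.contains c then [c, 'o', c] else [c]
  | a :: b :: rest =>
      let l := a :: b :: rest
      let m := l.length / 2
      rovEnc (l.take m) ++ rovEnc (l.drop m)
termination_by l => l.length
decreasing_by
  · have h := List.length_take_le (((a :: b :: rest).length) / 2) (a :: b :: rest)
    simp only [List.length_cons] at *
    omega
  · simp only [List.length_drop, List.length_cons] at *
    omega

def rovarsprak_alt (text : String) : String :=
  String.ofList (rovEnc (PySem.Str.lower text).toList)

-- ===== PRECONDITION & SPEC =====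
def Spec_rovarsprak (text : String) (out : String) : Prop := out = rovarsprak_alt text
instance (text : String) (out : String) : Decidable (Spec_rovarsprak text out) := by unfold Spec_rovarsprak; infer_instance

-- ===== CLAIM (what is proved, stated in full; the proofs are below) =====
def Claim_equal_rovarsprak : Prop := ∀ (text : String), Dom_rovarsprak text → Spec_rovarsprak text (rovarsprak text)

-- ===== LEMMAS AND PROOFS =====

-- the per-character step both programs agree on
def rovStep (c : Char) : List Char :=
  if "bcdfghjklmnpqrstvwxz".toList.contains c then [c, 'o', c] else [c]

-- divide-and-conquer equals character-wise flatMap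
lemma rovEnc_eq_flatMap : ∀ (n : ℕ) (l : List Char), l.length ≤ n → rovEnc l = l.flatMap rovStep := by
  intro n
  induction n with
  | zero =>
      intro l hl
      have : l = [] := List.eq_nil_of_length_eq_zero (Nat.le_zero.mp hl)
      subst this; simp [rovEnc]
  | succ n ih =>
      intro l hl
      match l with
      | [] => simp [rovEnc]
      | [c] => simp [rovEnc, rovStep]
      | a :: b :: rest =>
          rw [rovEnc]
          set l' := a :: b :: rest with hl'
          have hlen : l'.length = rest.length + 2 := by simp [hl']
          have hle : l'.length ≤ n + 1 := hl
          have ht := List.length_take_le (l'.length / 2) l'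
          have hd : (l'.drop (l'.length / 2)).length = l'.length - l'.length / 2 :=
            List.length_drop
          have h1 : (l'.take (l'.length / 2)).length ≤ n := by omega
          have h2 : (l'.drop (l'.length / 2)).length ≤ n := by omega
          rw [ih _ h1, ih _ h2, ← List.flatMap_append, List.take_append_drop]

-- ===== VERDICT (by name: the statement is the Claim_ definition above) =====
theorem rovarsprak_spec : Claim_equal_rovarsprak := by
  intro text _
  unfold Spec_rovarsprak rovarsprak rovarsprak_alt
  have hstep : ∀ (acc : List Char) (letter : Char),
      (if "bcdfghjklmnpqrstvwxz".toList.contains letter then acc ++ [letter, 'o', letter]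
       else acc ++ [letter]) = acc ++ rovStep letter := by
    intro acc letter
    unfold rovStep
    split <;> rfl
  simp only [hstep]
  rw [PySem.List.foldl_append_eq_flatMap,
    rovEnc_eq_flatMap (PySem.Str.lower text).toList.length _ le_rfl, List.nil_append]
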